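-- pv_equiv track=rewrite | github.com/akerusan-s/flask-project | data/telephone_util.py | seq_check
-- ===== SOURCE A (Python) =====
-- def seq_check(number):
--     a = b = False
--     for i in range(len(number)):
--         if number[i] == '(':
--             if a:
--                 return False
--             a = True
--         elif number[i] == ')':
--             if not a or b:
--                 return False
--             b = True
--     return (a and b) or (not a and not b)
-- ===== SOURCE B (Python) =====
-- def seq_check(number):
--     parens = [ch for ch in number if ch in '()']
--     return parens == [] or parens == ['(', ')']
-- ===== Notes on version B (the rewrite author's own statement) =====
-- stated objective: simpler
-- what changed: Replaces the per-character boolean state machine with early returns by filtering out the parenthesis characters and checking the resulting sequence is [] or exactly ['(', ')'].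
import Mathlib
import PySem

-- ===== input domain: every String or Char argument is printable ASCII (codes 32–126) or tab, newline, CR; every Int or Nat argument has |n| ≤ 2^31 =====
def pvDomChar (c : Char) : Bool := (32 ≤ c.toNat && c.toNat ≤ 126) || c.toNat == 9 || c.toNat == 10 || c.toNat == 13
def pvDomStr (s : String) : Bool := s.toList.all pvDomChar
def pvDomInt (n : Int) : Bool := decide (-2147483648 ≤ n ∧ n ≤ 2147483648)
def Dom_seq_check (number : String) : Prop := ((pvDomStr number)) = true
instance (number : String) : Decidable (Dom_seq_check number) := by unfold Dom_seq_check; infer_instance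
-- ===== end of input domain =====

-- ===== PORT A =====
-- B replaces A's per-character two-flag state machine by filtering the paren characters
-- and comparing the filtered sequence to [] / ['(', ')']; objective: simpler.
-- Loop of A: state (a, b), early return False modelled by returning false immediately.
def seqCheckLoop : List Char → Bool → Bool → Bool
  | [], a, b => (a && b) || (!a && !b)
  | ch :: rest, a, b =>
    if ch = '(' then
      if a then false else seqCheckLoop rest true b
    else if ch = ')' then
      if !a || b then false else seqCheckLoop rest a true
    else seqCheckLoop rest a b

def seq_check (number : String) : Bool := seqCheckLoop number.toList false false

-- ===== PORT B =====
def seq_check_alt (number : String) : Bool :=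
  let parens := number.toList.filter (fun ch => ch = '(' || ch = ')')
  parens == ([] : List Char) || parens == ['(', ')']

-- ===== PRECONDITION & SPEC =====
def Spec_seq_check (number : String) (out : Bool) : Prop := out = seq_check_alt number
instance (number : String) (out : Bool) : Decidable (Spec_seq_check number out) := by unfold Spec_seq_check; infer_instance

-- ===== CLAIM (what is proved, stated in full; the proofs are below) =====
def Claim_equal_seq_check : Prop := ∀ (number : String), Dom_seq_check number → Spec_seq_check number (seq_check number)

-- ===== LEMMAS AND PROOFS =====
-- Characterisation of A's loop from each reachable state, in terms of the filtered paren list.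
theorem seqCheckLoop_char (l : List Char) :
    (seqCheckLoop l false false
      = ((l.filter (fun ch => ch = '(' || ch = ')') == ([] : List Char))
         || (l.filter (fun ch => ch = '(' || ch = ')') == ['(', ')'])))
  ∧ (seqCheckLoop l true false
      = (l.filter (fun ch => ch = '(' || ch = ')') == [')']))
  ∧ (seqCheckLoop l true true
      = (l.filter (fun ch => ch = '(' || ch = ')') == ([] : List Char))) := by
  induction l with
  | nil => simp [seqCheckLoop]
  | cons ch rest ih =>
    obtain ⟨ih1, ih2, ih3⟩ := ih
    by_cases h1 : ch = '('
    · subst h1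
      simp [seqCheckLoop, List.filter, ih2]
    · by_cases h2 : ch = ')'
      · subst h2
        simp [seqCheckLoop, List.filter, ih3]
      · simp [seqCheckLoop, List.filter, h1, h2, ih1, ih2, ih3]

-- ===== VERDICT (by name: the statement is the Claim_ definition above) =====
theorem seq_check_spec : Claim_equal_seq_check := by
  intro number _
  unfold Spec_seq_check seq_check seq_check_alt
  simpa using (seqCheckLoop_char number.toList).1
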